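-- pv_equiv track=rewrite | github.com/rah-ai/PARINAMA.AI | parinama/backend/core/mutator.py | select_mutation_strategy
-- ===== SOURCE A (Python) =====
-- from enum import Enum
--
-- class MutationType(str, Enum):
--     """The 6 mutation strategies for prompt evolution."""
--     CLARIFY = "CLARIFY"
--     EXPAND = "EXPAND"
--     COMPRESS = "COMPRESS"
--     REFRAME = "REFRAME"
--     SPECIALIZE = "SPECIALIZE"
--     HUMANIZE = "HUMANIZE"
--
-- MUTATION_ROTATION = [
--     MutationType.CLARIFY,
--     MutationType.EXPAND,
--     MutationType.COMPRESS,
--     MutationType.REFRAME,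
--     MutationType.SPECIALIZE,
--     MutationType.HUMANIZE,
-- ]
--
-- def select_mutation_strategy(
--     generation_num: int,
--     weaknesses: list[str],
--     previous_mutations: list[str],
-- ) -> MutationType:
--     """
--     Intelligently select the best mutation strategy based on:
--     1. Current weaknesses (prioritize fixing the worst dimension)
--     2. Previous mutations used (avoid repeating the same one)
--     3. Generation number (cycle through rotation)
--
--     Args:
--         generation_num: Current generation number (1-indexed)
--         weaknesses: List of weak dimension names from scorer
--         previous_mutations: List of mutation types already used
--
--     Returns:
--         The selected MutationType
--     """
--     # Strategy 1: Target weaknesses directly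
--     if weaknesses:
--         # Map weakness dimensions to best mutation types
--         weakness_to_mutation = {
--             "clarity": MutationType.CLARIFY,
--             "specificity": MutationType.EXPAND,
--             "actionability": MutationType.CLARIFY,
--             "conciseness": MutationType.COMPRESS,
--             "creativity": MutationType.REFRAME,
--         }
--
--         for weakness in weaknesses:
--             candidate = weakness_to_mutation.get(weakness)
--             if candidate and candidate.value not in previous_mutations:
--                 return candidate
--
--         # If primary fix was already used, try secondary mappings
--         secondary_mapping = {
--             "clarity": MutationType.HUMANIZE,
--             "specificity": MutationType.SPECIALIZE,
--             "actionability": MutationType.EXPAND,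
--             "conciseness": MutationType.REFRAME,
--             "creativity": MutationType.HUMANIZE,
--         }
--
--         for weakness in weaknesses:
--             candidate = secondary_mapping.get(weakness)
--             if candidate and candidate.value not in previous_mutations:
--                 return candidate
--
--     # Strategy 2: Rotate through mutations that haven't been used
--     for mutation in MUTATION_ROTATION:
--         if mutation.value not in previous_mutations:
--             return mutation
--
--     # Strategy 3: Cycle based on generation number
--     idx = (generation_num - 1) % len(MUTATION_ROTATION)
--     return MUTATION_ROTATION[idx]
-- ===== SOURCE B (Python) =====
-- from enum import Enum
--
-- class MutationType(str, Enum):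
--     CLARIFY = "CLARIFY"
--     EXPAND = "EXPAND"
--     COMPRESS = "COMPRESS"
--     REFRAME = "REFRAME"
--     SPECIALIZE = "SPECIALIZE"
--     HUMANIZE = "HUMANIZE"
--
-- MUTATION_ROTATION = [
--     MutationType.CLARIFY,
--     MutationType.EXPAND,
--     MutationType.COMPRESS,
--     MutationType.REFRAME,
--     MutationType.SPECIALIZE,
--     MutationType.HUMANIZE,
-- ]
--
-- PRIMARY = {
--     "clarity": MutationType.CLARIFY,
--     "specificity": MutationType.EXPAND,
--     "actionability": MutationType.CLARIFY,
--     "conciseness": MutationType.COMPRESS,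
--     "creativity": MutationType.REFRAME,
-- }
--
-- SECONDARY = {
--     "clarity": MutationType.HUMANIZE,
--     "specificity": MutationType.SPECIALIZE,
--     "actionability": MutationType.EXPAND,
--     "conciseness": MutationType.REFRAME,
--     "creativity": MutationType.HUMANIZE,
-- }
--
-- def _rank(v, weaknesses):
--     """Priority rank of mutation v: its earliest slot in the conceptual priority
--     sequence (primary fixes by weakness position, then secondary fixes, then the
--     fixed rotation).  Smaller rank = higher priority."""
--     n = len(weaknesses)
--     for i, w in enumerate(weaknesses):
--         if PRIMARY.get(w) == v:
--             return i
--     for i, w in enumerate(weaknesses):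
--         if SECONDARY.get(w) == v:
--             return n + i
--     return 2 * n + MUTATION_ROTATION.index(v)  # every mutation is in the rotation
--
-- def select_mutation_strategy(generation_num, weaknesses, previous_mutations):
--     # Invert the scan: instead of walking a candidate sequence and testing each
--     # against previous_mutations, walk the SIX mutation types, compute each
--     # unused one's priority rank, and return the argmin.
--     used = set(previous_mutations)
--     best = None
--     for v in MUTATION_ROTATION:
--         if v.value not in used:
--             r = _rank(v, weaknesses)
--             if best is None or r < best[0]:
--                 best = (r, v)
--     if best is not None:
--         return best[1]
--     return MUTATION_ROTATION[(generation_num - 1) % len(MUTATION_ROTATION)]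
-- ===== Notes on version B (the rewrite author's own statement) =====
-- stated objective: alternative
-- what changed: Inverts A's scan: instead of walking the candidate sequence (primary fixes, secondary fixes, rotation) and testing each against previous_mutations, B walks the six mutation types, computes each unused one's priority rank in that conceptual sequence, and returns the argmin, with the generation-cycle index as the only fallback.
import Mathlib
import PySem

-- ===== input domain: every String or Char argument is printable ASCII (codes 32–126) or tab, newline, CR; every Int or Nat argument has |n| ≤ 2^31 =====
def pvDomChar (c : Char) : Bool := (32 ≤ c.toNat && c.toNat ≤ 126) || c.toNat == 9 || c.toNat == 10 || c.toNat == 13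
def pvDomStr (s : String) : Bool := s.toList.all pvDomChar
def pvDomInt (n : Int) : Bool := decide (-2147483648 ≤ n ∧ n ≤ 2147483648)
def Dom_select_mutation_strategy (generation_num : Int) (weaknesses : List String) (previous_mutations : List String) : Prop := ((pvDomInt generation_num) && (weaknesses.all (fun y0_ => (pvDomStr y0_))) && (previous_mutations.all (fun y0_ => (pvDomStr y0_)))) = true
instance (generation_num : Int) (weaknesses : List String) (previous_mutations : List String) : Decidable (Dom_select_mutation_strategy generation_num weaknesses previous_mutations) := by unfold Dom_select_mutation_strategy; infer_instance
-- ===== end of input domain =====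

-- B inverts A's scan: instead of walking the candidate sequence (primary fixes, secondary
-- fixes, rotation) and testing each against previous_mutations, it walks the SIX mutation
-- types, computes each unused one's priority rank, and returns the argmin; objective: alternative.


-- ===== PORT A =====
def pvRotation : List String :=
  ["CLARIFY", "EXPAND", "COMPRESS", "REFRAME", "SPECIALIZE", "HUMANIZE"]

def pvPrimary : PySem.Dict String String := PySem.Dict.ofList
  [("clarity", "CLARIFY"), ("specificity", "EXPAND"), ("actionability", "CLARIFY"),
   ("conciseness", "COMPRESS"), ("creativity", "REFRAME")]

def pvSecondary : PySem.Dict String String := PySem.Dict.ofList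
  [("clarity", "HUMANIZE"), ("specificity", "SPECIALIZE"), ("actionability", "EXPAND"),
   ("conciseness", "REFRAME"), ("creativity", "HUMANIZE")]

-- A's weakness loop: first mapped candidate not already used (early return)
def pvLoopA (m : PySem.Dict String String) (ws prev : List String) : Option String :=
  match ws with
  | [] => none
  | w :: rest =>
    match PySem.Dict.get? m w with
    | some c => if !(prev.contains c) then some c else pvLoopA m rest prev
    | none => pvLoopA m rest prev

def select_mutation_strategy (generation_num : Int) (weaknesses : List String) (previous_mutations : List String) : String :=
  let step1 : Option String :=
    if weaknesses ≠ [] then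
      match pvLoopA pvPrimary weaknesses previous_mutations with
      | some c => some c
      | none => pvLoopA pvSecondary weaknesses previous_mutations
    else none
  match step1 with
  | some c => c
  | none =>
    match pvRotation.find? (fun m => !(previous_mutations.contains m)) with
    | some m => m
    | none => pvRotation.getD (PySem.Int.mod (generation_num - 1) 6).toNat ""

-- ===== PORT B =====
-- B's _rank helper: earliest slot of v in the conceptual priority sequence.  Each Python
-- 'for i, w in enumerate: if d.get(w) == v: return i' loop is findIdx? over the weaknesses.
def pvHitIdx (m : PySem.Dict String String) (weaknesses : List String) (v : String) : Option Nat :=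
  List.findIdx? (fun w => PySem.Dict.get? m w == some v) weaknesses

-- 'MUTATION_ROTATION.index(v)': v is always one of the six rotation values, so Python's
-- .index never raises; idxOf is exact here.
def pvRankB (weaknesses : List String) (v : String) : Nat :=
  match pvHitIdx pvPrimary weaknesses v with
  | some i => i
  | none =>
    match pvHitIdx pvSecondary weaknesses v with
    | some i => weaknesses.length + i
    | none => 2 * weaknesses.length + pvRotation.idxOf v

def select_mutation_strategy_alt (generation_num : Int) (weaknesses : List String) (previous_mutations : List String) : String :=
  let used : PySem.Set String := PySem.Set.ofList previous_mutations
  let best : Option (Nat × String) := pvRotation.foldl (fun acc v =>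
    if !(PySem.Set.contains used v) then
      let r := pvRankB weaknesses v
      match acc with
      | none => some (r, v)
      | some (r0, u0) => if r < r0 then some (r, v) else some (r0, u0)
    else acc) none
  match best with
  | some ru => ru.2
  | none => pvRotation.getD (PySem.Int.mod (generation_num - 1) 6).toNat ""

-- ===== PRECONDITION & SPEC =====
def Spec_select_mutation_strategy (generation_num : Int) (weaknesses : List String) (previous_mutations : List String) (out : String) : Prop := out = select_mutation_strategy_alt generation_num weaknesses previous_mutations
instance (generation_num : Int) (weaknesses : List String) (previous_mutations : List String) (out : String) : Decidable (Spec_select_mutation_strategy generation_num weaknesses previous_mutations out) := by unfold Spec_select_mutation_strategy; infer_instance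

-- ===== CLAIM (what is proved, stated in full; the proofs are below) =====
def Claim_equal_select_mutation_strategy : Prop := ∀ (generation_num : Int) (weaknesses : List String) (previous_mutations : List String), Dom_select_mutation_strategy generation_num weaknesses previous_mutations → Spec_select_mutation_strategy generation_num weaknesses previous_mutations (select_mutation_strategy generation_num weaknesses previous_mutations)

-- ===== LEMMAS AND PROOFS =====

-- A's early-return loop over one mapping = find? over the filterMap of that mapping
theorem pvLoopA_eq_find (m : PySem.Dict String String) (ws prev : List String) :
    pvLoopA m ws prev
      = (ws.filterMap (fun w => PySem.Dict.get? m w)).find? (fun c => !(prev.contains c)) := by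
  induction ws with
  | nil => rfl
  | cons w rest ih =>
    simp only [pvLoopA, List.filterMap_cons]
    cases h : PySem.Dict.get? m w with
    | none => simpa using ih
    | some c =>
      simp only [List.find?_cons]
      cases hc : (!(prev.contains c)) <;> simp [ih]

-- A rewritten as one first-match scan over the full candidate sequence
theorem A_canon (g : Int) (ws prev : List String) :
    select_mutation_strategy g ws prev =
      match (ws.filterMap (fun w => PySem.Dict.get? pvPrimary w)
             ++ (ws.filterMap (fun w => PySem.Dict.get? pvSecondary w)
             ++ pvRotation)).find? (fun c => !(prev.contains c)) with
      | some c => c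
      | none => pvRotation.getD (PySem.Int.mod (g - 1) 6).toNat "" := by
  unfold select_mutation_strategy
  simp only [List.find?_append, pvLoopA_eq_find]
  cases hws : ws with
  | nil => simp
  | cons w rest =>
    simp only [ne_eq, reduceCtorEq, not_false_iff, if_true]
    cases h1 : (List.filterMap (fun w => PySem.Dict.get? pvPrimary w) (w :: rest)).find? (fun c => !(prev.contains c)) with
    | some c => simp
    | none =>
      simp only [Option.none_or]
      cases h2 : (List.filterMap (fun w => PySem.Dict.get? pvSecondary w) (w :: rest)).find? (fun c => !(prev.contains c)) with
      | some c => simp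
      | none => simp

-- every value of the two mappings is one of the six rotation strings
theorem mem_rot_of_primary (w v : String) (h : PySem.Dict.get? pvPrimary w = some v) : v ∈ pvRotation := by
  have e : pvPrimary = PySem.Dict.mk
      [("clarity", "CLARIFY"), ("specificity", "EXPAND"), ("actionability", "CLARIFY"),
       ("conciseness", "COMPRESS"), ("creativity", "REFRAME")] := by decide
  rw [e] at h
  simp only [PySem.Dict.get?_mk_cons] at h
  split_ifs at h <;> simp_all [pvRotation, PySem.Dict.get?]

theorem mem_rot_of_secondary (w v : String) (h : PySem.Dict.get? pvSecondary w = some v) : v ∈ pvRotation := by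
  have e : pvSecondary = PySem.Dict.mk
      [("clarity", "HUMANIZE"), ("specificity", "SPECIALIZE"), ("actionability", "EXPAND"),
       ("conciseness", "REFRAME"), ("creativity", "HUMANIZE")] := by decide
  rw [e] at h
  simp only [PySem.Dict.get?_mk_cons] at h
  split_ifs at h <;> simp_all [pvRotation, PySem.Dict.get?]

-- a findIdx? hit index is within the list
theorem hitIdx_lt_length (m : PySem.Dict String String) (ws : List String) (v : String) (i : Nat)
    (h : pvHitIdx m ws v = some i) : i < ws.length := by
  obtain ⟨hi, -, -⟩ := List.findIdx?_eq_some_iff_getElem.mp h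
  exact hi

-- a findIdx? hit means the value occurs in the filterMap
theorem mem_filterMap_of_hit (m : PySem.Dict String String) (ws : List String) (v : String) (i : Nat)
    (h : pvHitIdx m ws v = some i) : v ∈ ws.filterMap (fun w => PySem.Dict.get? m w) := by
  obtain ⟨hi, hp, -⟩ := List.findIdx?_eq_some_iff_getElem.mp h
  refine List.mem_filterMap.mpr ⟨ws[i], List.getElem_mem hi, ?_⟩
  simpa [beq_iff_eq] using hp

-- the first unused element of a filterMap segment has the strictly smallest hit index
-- among unused values (the crux connecting A's scan order with B's ranks)
theorem find_filterMap_min (m : PySem.Dict String String) (p : String → Bool) :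
    ∀ (ws : List String) (c : String),
      (ws.filterMap (fun w => PySem.Dict.get? m w)).find? p = some c →
      ∃ i, pvHitIdx m ws c = some i ∧
        ∀ u j, p u = true → u ≠ c → pvHitIdx m ws u = some j → i < j := by
  intro ws
  induction ws with
  | nil => intro c h; simp at h
  | cons w rest ih =>
    intro c h
    rw [List.filterMap_cons] at h
    cases hm : PySem.Dict.get? m w with
    | none =>
      rw [hm] at h
      obtain ⟨i, hi, hmin⟩ := ih c h
      refine ⟨i + 1, ?_, ?_⟩
      · rw [pvHitIdx, List.findIdx?_cons]
        rw [if_neg (by simp [hm])]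
        simp only [pvHitIdx] at hi
        rw [hi]; rfl
      · intro u j hpu huc hj
        rw [pvHitIdx, List.findIdx?_cons] at hj
        rw [if_neg (by simp [hm])] at hj
        obtain ⟨j', hj', rfl⟩ := Option.map_eq_some_iff.mp hj
        have := hmin u j' hpu huc (by simpa [pvHitIdx] using hj')
        omega
    | some a =>
      rw [hm, List.find?_cons] at h
      cases hpa : p a with
      | true =>
        simp only [hpa] at h
        injection h with h
        subst h
        refine ⟨0, ?_, ?_⟩
        · rw [pvHitIdx, List.findIdx?_cons]
          rw [if_pos (by simp [hm])]
        · intro u j hpu huc hj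
          rw [pvHitIdx, List.findIdx?_cons] at hj
          rw [if_neg (by simp [hm]; exact fun e => huc e.symm)] at hj
          obtain ⟨j', hj', rfl⟩ := Option.map_eq_some_iff.mp hj
          omega
      | false =>
        simp only [hpa] at h
        obtain ⟨i, hi, hmin⟩ := ih c h
        have hpc : p c = true := List.find?_some h
        have hac : a ≠ c := by intro e; rw [e, hpc] at hpa; cases hpa
        refine ⟨i + 1, ?_, ?_⟩
        · rw [pvHitIdx, List.findIdx?_cons]
          rw [if_neg (by simp [hm]; exact hac)]
          simp only [pvHitIdx] at hi
          rw [hi]; rfl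
        · intro u j hpu huc hj
          have hau : a ≠ u := by intro e; rw [e, hpu] at hpa; cases hpa
          rw [pvHitIdx, List.findIdx?_cons] at hj
          rw [if_neg (by simp [hm]; exact hau)] at hj
          obtain ⟨j', hj', rfl⟩ := Option.map_eq_some_iff.mp hj
          have := hmin u j' hpu huc (by simpa [pvHitIdx] using hj')
          omega

theorem find_filterMap_none (m : PySem.Dict String String) (p : String → Bool)
    (ws : List String)
    (h : (ws.filterMap (fun w => PySem.Dict.get? m w)).find? p = none)
    (u : String) (j : Nat) (hu : p u = true) (hj : pvHitIdx m ws u = some j) : False := by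
  have hmem := mem_filterMap_of_hit m ws u j hj
  have := List.find?_eq_none.mp h u hmem
  simp [hu] at this

-- the first unused element of a list has the strictly smallest idxOf among unused values
theorem find_idxOf_min :
    ∀ (l : List String) (p : String → Bool) (c : String), l.find? p = some c →
      ∀ u ∈ l, p u = true → u ≠ c → l.idxOf c < l.idxOf u := by
  intro l
  induction l with
  | nil => intro p c h; simp at h
  | cons w rest ih =>
    intro p c h u hu hpu huc
    rw [List.find?_cons] at h
    cases hw : p w with
    | true =>
      simp only [hw] at h
      injection h with h
      subst h
      have hwu : w ≠ u := fun e => huc e.symm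
      have hurest : u ∈ rest := by
        cases hu with
        | head => exact absurd rfl huc
        | tail _ h => exact h
      rw [List.idxOf_cons_self, List.idxOf_cons_ne rest hwu]
      omega
    | false =>
      simp only [hw] at h
      have hpc : p c = true := List.find?_some h
      have hwc : w ≠ c := by intro e; rw [e, hpc] at hw; cases hw
      have hwu : w ≠ u := by intro e; rw [e, hpu] at hw; cases hw
      have hurest : u ∈ rest := by
        cases hu with
        | head => exact absurd rfl (fun e => hwu e.symm)
        | tail _ h => exact h
      rw [List.idxOf_cons_ne rest hwc, List.idxOf_cons_ne rest hwu]
      have := ih p c h u hurest hpu huc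
      omega

-- argmin fold: once the accumulator holds the minimum, it is kept
theorem fold_keep (key : String → Nat) (p : String → Bool) :
    ∀ (l : List String) (r : Nat) (v : String),
      (∀ u ∈ l, p u = true → ¬ key u < r) →
      l.foldl (fun acc u =>
        if p u then
          match acc with
          | none => some (key u, u)
          | some (r0, u0) => if key u < r0 then some (key u, u) else some (r0, u0)
        else acc) (some (r, v)) = some (r, v) := by
  intro l
  induction l with
  | nil => intro r v _; rfl
  | cons w rest ih =>
    intro r v hmin
    rw [List.foldl_cons]
    by_cases hw : p w = true
    · have hnot : ¬ key w < r := hmin w (by simp) hw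
      rw [if_pos hw]
      show List.foldl _ (if key w < r then some (key w, w) else some (r, v)) rest = _
      rw [if_neg hnot]
      exact ih r v (fun u hu hp => hmin u (by simp [hu]) hp)
    · rw [if_neg hw]
      exact ih r v (fun u hu hp => hmin u (by simp [hu]) hp)

-- argmin fold returns the unique unused element of strictly minimal key
theorem fold_min (key : String → Nat) (p : String → Bool) :
    ∀ (l : List String) (v : String) (acc : Option (Nat × String)),
      v ∈ l → p v = true →
      (∀ u ∈ l, p u = true → u ≠ v → key v < key u) →
      (acc = none ∨ ∃ r0 u0, acc = some (r0, u0) ∧ key v < r0) →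
      l.foldl (fun acc u =>
        if p u then
          match acc with
          | none => some (key u, u)
          | some (r0, u0) => if key u < r0 then some (key u, u) else some (r0, u0)
        else acc) acc = some (key v, v) := by
  intro l
  induction l with
  | nil => intro v acc hv; simp at hv
  | cons w rest ih =>
    intro v acc hv hp hmin hacc
    rw [List.foldl_cons]
    by_cases hwv : w = v
    · subst hwv
      have hkeep : ∀ u ∈ rest, p u = true → ¬ key u < key w := fun u hu hpu => by
        by_cases huw : u = w
        · subst huw; omega
        · have := hmin u (by simp [hu]) hpu huw; omega
      rcases hacc with rfl | ⟨r0, u0, rfl, hlt⟩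
      · rw [if_pos hp]
        exact fold_keep key p rest (key w) w hkeep
      · rw [if_pos hp]
        show List.foldl _ (if key w < r0 then some (key w, w) else some (r0, u0)) rest = _
        rw [if_pos hlt]
        exact fold_keep key p rest (key w) w hkeep
    · have hvrest : v ∈ rest := by
        cases hv with
        | head => exact absurd rfl hwv
        | tail _ h => exact h
      have hmin' : ∀ u ∈ rest, p u = true → u ≠ v → key v < key u :=
        fun u hu hpu huv => hmin u (by simp [hu]) hpu huv
      by_cases hw : p w = true
      · have hkv : key v < key w := hmin w (by simp) hw hwv
        rw [if_pos hw]
        rcases hacc with rfl | ⟨r0, u0, rfl, hlt⟩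
        · exact ih v _ hvrest hp hmin' (Or.inr ⟨key w, w, rfl, hkv⟩)
        · show List.foldl _ (if key w < r0 then some (key w, w) else some (r0, u0)) rest = _
          by_cases h0 : key w < r0
          · rw [if_pos h0]
            exact ih v _ hvrest hp hmin' (Or.inr ⟨key w, w, rfl, hkv⟩)
          · rw [if_neg h0]
            exact ih v _ hvrest hp hmin' (Or.inr ⟨r0, u0, rfl, hlt⟩)
      · rw [if_neg hw]
        exact ih v acc hvrest hp hmin' hacc

-- argmin fold over all-used elements returns the accumulator unchanged
theorem fold_none (key : String → Nat) (p : String → Bool) :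
    ∀ (l : List String) (acc : Option (Nat × String)),
      (∀ u ∈ l, p u = false) →
      l.foldl (fun acc u =>
        if p u then
          match acc with
          | none => some (key u, u)
          | some (r0, u0) => if key u < r0 then some (key u, u) else some (r0, u0)
        else acc) acc = acc := by
  intro l
  induction l with
  | nil => intro acc _; rfl
  | cons w rest ih =>
    intro acc hall
    have hw : p w = false := hall w (by simp)
    rw [List.foldl_cons, if_neg (by simp [hw])]
    exact ih acc (fun u hu => hall u (by simp [hu]))

-- B's rank when the value has a primary hit
theorem rankB_primary (ws : List String) (c : String) (i : Nat)
    (hi : pvHitIdx pvPrimary ws c = some i) : pvRankB ws c = i := by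
  rw [pvRankB, hi]

-- ===== VERDICT (by name: the statement is the Claim_ definition above) =====
theorem select_mutation_strategy_spec : Claim_equal_select_mutation_strategy := by
  intro g ws prev _
  unfold Spec_select_mutation_strategy
  rw [A_canon]
  unfold select_mutation_strategy_alt
  simp only [PySem.Set.contains_eq_listContains, List.contains_eq_mem, PySem.Set.mem_ofList,
    List.find?_append]
  set p : String → Bool := fun c => !decide (c ∈ prev) with hpdef
  cases h1 : (ws.filterMap (fun w => PySem.Dict.get? pvPrimary w)).find? p with
  | some c =>
    have hpc : p c = true := List.find?_some h1
    have hcmem : c ∈ pvRotation := by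
      obtain ⟨w, -, hw⟩ := List.mem_filterMap.mp (List.mem_of_find?_eq_some h1)
      exact mem_rot_of_primary w c hw
    obtain ⟨i, hi, hmin⟩ := find_filterMap_min pvPrimary p ws c h1
    have hiws : i < ws.length := hitIdx_lt_length _ _ _ _ hi
    have hkey : ∀ u ∈ pvRotation, p u = true → u ≠ c → pvRankB ws c < pvRankB ws u := by
      intro u _ hpu huc
      rw [rankB_primary ws c i hi]
      cases hup : pvHitIdx pvPrimary ws u with
      | some j => rw [rankB_primary ws u j hup]; exact hmin u j hpu huc hup
      | none =>
        rw [pvRankB, hup]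
        cases hus : pvHitIdx pvSecondary ws u with
        | some j => show i < ws.length + j; omega
        | none => show i < 2 * ws.length + pvRotation.idxOf u; omega
    rw [fold_min (pvRankB ws) p pvRotation c none hcmem hpc hkey (Or.inl rfl)]
    rfl
  | none =>
    cases h2 : (ws.filterMap (fun w => PySem.Dict.get? pvSecondary w)).find? p with
    | some c =>
      have hpc : p c = true := List.find?_some h2
      have hcmem : c ∈ pvRotation := by
        obtain ⟨w, -, hw⟩ := List.mem_filterMap.mp (List.mem_of_find?_eq_some h2)
        exact mem_rot_of_secondary w c hw
      obtain ⟨i, hi, hmin⟩ := find_filterMap_min pvSecondary p ws c h2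
      have hiws : i < ws.length := hitIdx_lt_length _ _ _ _ hi
      have hPnone : ∀ u, p u = true → pvHitIdx pvPrimary ws u = none := by
        intro u hpu
        cases hup : pvHitIdx pvPrimary ws u with
        | some j => exact absurd (find_filterMap_none pvPrimary p ws h1 u j hpu hup) (by simp)
        | none => rfl
      have hrankc : pvRankB ws c = ws.length + i := by
        rw [pvRankB, hPnone c hpc, hi]
      have hkey : ∀ u ∈ pvRotation, p u = true → u ≠ c → pvRankB ws c < pvRankB ws u := by
        intro u _ hpu huc
        rw [hrankc, pvRankB, hPnone u hpu]
        cases hus : pvHitIdx pvSecondary ws u with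
        | some j =>
          have := hmin u j hpu huc hus
          show ws.length + i < ws.length + j
          omega
        | none => show ws.length + i < 2 * ws.length + pvRotation.idxOf u; omega
      rw [fold_min (pvRankB ws) p pvRotation c none hcmem hpc hkey (Or.inl rfl)]
      rfl
    | none =>
      have hPnone : ∀ u, p u = true → pvHitIdx pvPrimary ws u = none := by
        intro u hpu
        cases hup : pvHitIdx pvPrimary ws u with
        | some j => exact absurd (find_filterMap_none pvPrimary p ws h1 u j hpu hup) (by simp)
        | none => rfl
      have hSnone : ∀ u, p u = true → pvHitIdx pvSecondary ws u = none := by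
        intro u hpu
        cases hus : pvHitIdx pvSecondary ws u with
        | some j => exact absurd (find_filterMap_none pvSecondary p ws h2 u j hpu hus) (by simp)
        | none => rfl
      cases h3 : pvRotation.find? p with
      | some c =>
        have hpc : p c = true := List.find?_some h3
        have hcmem : c ∈ pvRotation := List.mem_of_find?_eq_some h3
        have hkey : ∀ u ∈ pvRotation, p u = true → u ≠ c → pvRankB ws c < pvRankB ws u := by
          intro u humem hpu huc
          rw [pvRankB, hPnone c hpc, hSnone c hpc, pvRankB, hPnone u hpu, hSnone u hpu]
          have := find_idxOf_min pvRotation p c h3 u humem hpu huc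
          show 2 * ws.length + pvRotation.idxOf c < 2 * ws.length + pvRotation.idxOf u
          omega
        rw [fold_min (pvRankB ws) p pvRotation c none hcmem hpc hkey (Or.inl rfl)]
        rfl
      | none =>
        have hall : ∀ u ∈ pvRotation, p u = false := by
          intro u hu
          have := List.find?_eq_none.mp h3 u hu
          simpa using this
        rw [fold_none (pvRankB ws) p pvRotation none hall]
        rfl
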